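-- pv_equiv track=rewrite | github.com/981377660LMT/algorithm-study | tmp/20211216/2090. 半径为 k 的子数组平均值.py | getAverages1
-- ===== SOURCE A (Python) =====
-- from typing import List
--
-- def getAverages1(nums: List[int], k: int) -> List[int]:
--     res = [-1] * len(nums)
--     curSum = 0  # range sum
--     for i, x in enumerate(nums):
--         curSum += x
--         if i >= 2 * k + 1:
--             curSum -= nums[i - (2 * k + 1)]
--         if i + 1 >= 2 * k + 1:
--             res[i - k] = curSum // (2 * k + 1)
--     return res
-- ===== SOURCE B (Python) =====
-- from typing import List
--
-- def getAverages1(nums: List[int], k: int) -> List[int]: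
--     n = len(nums)
--     res = [-1] * n
--     w = 2 * k + 1
--     if k >= 0 and w <= n:
--         P = [0]
--         for x in nums:
--             P.append(P[-1] + x)
--         for i in range(k, n - k):
--             res[i] = (P[i + k + 1] - P[i - k]) // w
--     return res
-- ===== Notes on version B (the rewrite author's own statement) =====
-- stated objective: alternative
-- what changed: Replaces A's single incremental sliding-window pass (running sum with conditional subtraction and in-place writes while scanning) by building a prefix-sum table in one pass and then filling only the valid positions by random access in a second pass, guarded by an explicit validity test k>=0 and 2k+1<=n.
import Mathlib
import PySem

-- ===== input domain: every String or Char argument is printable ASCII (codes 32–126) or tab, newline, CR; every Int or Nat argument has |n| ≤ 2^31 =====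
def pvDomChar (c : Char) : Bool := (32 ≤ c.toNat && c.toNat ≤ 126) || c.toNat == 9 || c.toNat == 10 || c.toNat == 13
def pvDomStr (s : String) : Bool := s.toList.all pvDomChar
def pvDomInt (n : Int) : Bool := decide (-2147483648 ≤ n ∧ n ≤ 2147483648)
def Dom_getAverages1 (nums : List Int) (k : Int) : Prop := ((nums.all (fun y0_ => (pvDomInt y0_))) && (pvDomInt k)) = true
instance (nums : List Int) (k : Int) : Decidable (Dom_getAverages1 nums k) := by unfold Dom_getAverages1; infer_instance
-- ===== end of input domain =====

-- B replaces A's incremental sliding-window pass by a prefix-sum table plus a random-access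
-- fill of the valid positions (alternative decomposition, same O(n) cost).


-- ===== PORT A =====
-- pyGetD/pySetD are the total forms of xs[·]; under Pre_ (k ≥ 0, or empty list) every index
-- A uses is in range, so they are exact here.
def getAverages1 (nums : List Int) (k : Int) : List Int :=
  let res : List Int := List.replicate nums.length (-1)
  let st := (PySem.List.enumerate nums).foldl
    (fun (st : List Int × Int) (ix : Int × Int) =>
      let curSum := st.2 + ix.2
      let curSum := if 2*k+1 ≤ ix.1 then curSum - PySem.List.pyGetD nums (ix.1 - (2*k+1)) 0 else curSum
      let res := if 2*k+1 ≤ ix.1 + 1 then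
          PySem.List.pySetD st.1 (ix.1 - k) (PySem.Int.floordiv curSum (2*k+1))
        else st.1
      (res, curSum))
    (res, 0)
  st.1

-- ===== PORT B =====
def getAverages1_alt (nums : List Int) (k : Int) : List Int :=
  let n := nums.length
  let res : List Int := List.replicate n (-1)
  let w := 2*k+1
  if 0 ≤ k ∧ w ≤ (n : Int) then
    let P := nums.foldl (fun P x => P ++ [PySem.List.pyGetD P (-1) 0 + x]) [(0 : Int)]
    (PySem.List.pyRange k ((n : Int) - k) 1).foldl
      (fun res i =>
        PySem.List.pySetD res i
          (PySem.Int.floordiv (PySem.List.pyGetD P (i+k+1) 0 - PySem.List.pyGetD P (i-k) 0) w))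
      res
  else res

-- ===== PRECONDITION & SPEC =====
-- Pre_ excludes exactly the inputs on which A raises IndexError: a negative radius k with a
-- nonempty list makes A's window indices run past the list.
def Pre_getAverages1 (nums : List Int) (k : Int) : Prop := 0 ≤ k ∨ nums = []
instance (nums : List Int) (k : Int) : Decidable (Pre_getAverages1 nums k) := by unfold Pre_getAverages1; infer_instance
def pvWitness_getAverages1 : List Int × Int := ([7, 4, 3, 9, 1, 8, 5, 2, 6], 1)

def Spec_getAverages1 (nums : List Int) (k : Int) (out : List Int) : Prop := out = getAverages1_alt nums k
instance (nums : List Int) (k : Int) (out : List Int) : Decidable (Spec_getAverages1 nums k out) := by unfold Spec_getAverages1; infer_instance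

-- ===== CLAIM (what is proved, stated in full; the proofs are below) =====
def Claim_equal_getAverages1 : Prop := ∀ (nums : List Int) (k : Int), Dom_getAverages1 nums k → Pre_getAverages1 nums k → Spec_getAverages1 nums k (getAverages1 nums k)
-- ===== LEMMAS AND PROOFS =====

-- prefix sum of the first j elements
def pfx (nums : List Int) (j : Nat) : Int := (nums.take j).sum

-- the result list after the first t iterations of A's loop
def resT (nums : List Int) (k : Int) (t : Nat) : List Int :=
  (List.range nums.length).map (fun j =>
    if k.toNat ≤ j ∧ j + k.toNat < t then
      PySem.Int.floordiv (pfx nums (j + k.toNat + 1) - pfx nums (j - k.toNat)) (2*k+1)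
    else -1)

-- the running window sum after the first t iterations of A's loop
def sumT (nums : List Int) (k : Int) (t : Nat) : Int :=
  pfx nums t - pfx nums (t - (2*k.toNat+1))

lemma pfx_succ (nums : List Int) (t : Nat) (h : t < nums.length) :
    pfx nums (t+1) = pfx nums t + nums[t] := by
  unfold pfx
  rw [List.take_add_one, List.getElem?_eq_getElem h, List.sum_append]
  simp

lemma buildP (xs : List Int) : ∀ (L : List Int),
    xs.foldl (fun P x => P ++ [PySem.List.pyGetD P (-1) 0 + x]) L
      = L ++ (List.range xs.length).map (fun j => PySem.List.pyGetD L (-1) 0 + (xs.take (j+1)).sum) := by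
  induction xs with
  | nil => intro L; simp
  | cons x rest ih =>
    intro L
    rw [List.foldl_cons, ih]
    have hg : PySem.List.pyGetD (L ++ [PySem.List.pyGetD L (-1) 0 + x]) (-1) 0
        = PySem.List.pyGetD L (-1) 0 + x := by
      simp [PySem.List.pyGetD, PySem.List.pyGet?_neg_one]
    rw [hg]
    rw [List.length_cons, List.range_succ_eq_map, List.map_cons, List.map_map]
    simp only [List.take_succ_cons, List.sum_cons, List.append_assoc, List.singleton_append,
      List.take_zero, List.sum_nil]
    congr 2
    · ring
    · exact List.map_congr_left (fun j _ => by
        simp only [Function.comp_apply, Nat.succ_eq_add_one]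
        ring)

lemma setLoop (n : Nat) (g : Int → Int) (a : Int) (h0 : 0 ≤ a) :
    ∀ (m : Nat) (b : Int), b = a + m → b ≤ (n : Int) →
    (PySem.List.pyRange a b 1).foldl
        (fun res i => PySem.List.pySetD res i (g i)) (List.replicate n (-1))
      = (List.range n).map (fun j : Nat => if a ≤ (j : Int) ∧ (j : Int) < b then g (j : Int) else -1) := by
  intro m
  induction m with
  | zero =>
    intro b hb _
    subst hb
    rw [PySem.List.pyRange_one_eq_nil (by omega)]
    simp only [List.foldl_nil]
    apply List.ext_getElem
    · simp
    · intro j h1 h2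
      simp only [List.getElem_replicate, List.getElem_map, List.getElem_range]
      rw [if_neg (by omega)]
  | succ m ih =>
    intro b hb hbn
    have hb' : b = (a + m) + 1 := by omega
    subst hb'
    rw [PySem.List.pyRange_one_succ_right (by omega), List.foldl_append]
    rw [ih (a + m) rfl (by omega)]
    simp only [List.foldl_cons, List.foldl_nil]
    rw [PySem.List.pySetD_of_nonneg _ _ (by omega)]
    apply List.ext_getElem
    · simp
    · intro j h1 h2
      rw [List.getElem_set]
      simp only [List.getElem_map, List.getElem_range]
      by_cases hj : (a + m).toNat = j
      · rw [if_pos hj, if_pos (by omega)]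
        congr 1
        omega
      · rw [if_neg hj]
        by_cases hc : a ≤ (j : Int) ∧ (j : Int) < a + m
        · rw [if_pos hc, if_pos (by omega)]
        · rw [if_neg hc, if_neg (by omega)]

lemma Aloop (nums : List Int) (k : Int) (hk : 0 ≤ k) :
    ∀ (m t : Nat), t + m = nums.length →
    (PySem.List.enumerate (nums.drop t) (t : Int)).foldl
      (fun (st : List Int × Int) (ix : Int × Int) =>
        let curSum := st.2 + ix.2
        let curSum := if 2*k+1 ≤ ix.1 then curSum - PySem.List.pyGetD nums (ix.1 - (2*k+1)) 0 else curSum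
        let res := if 2*k+1 ≤ ix.1 + 1 then
            PySem.List.pySetD st.1 (ix.1 - k) (PySem.Int.floordiv curSum (2*k+1))
          else st.1
        (res, curSum))
      (resT nums k t, sumT nums k t)
      = (resT nums k nums.length, sumT nums k nums.length) := by
  intro m
  induction m with
  | zero =>
    intro t ht
    have h : t = nums.length := by omega
    subst h
    rw [List.drop_of_length_le (by omega)]
    simp [PySem.List.enumerate_nil]
  | succ m ih =>
    intro t ht
    have h : t < nums.length := by omega
    rw [List.drop_eq_getElem_cons h, PySem.List.enumerate_cons, List.foldl_cons]
    have hK : ((k.toNat : Int)) = k := Int.toNat_of_nonneg hk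
    have hsum : (if 2*k+1 ≤ (t:Int) then sumT nums k t + nums[t] - PySem.List.pyGetD nums ((t:Int) - (2*k+1)) 0 else sumT nums k t + nums[t]) = sumT nums k (t+1) := by
      by_cases h1 : 2*k.toNat+1 ≤ t
      · rw [if_pos (by omega)]
        rw [show (t:Int) - (2*k+1) = (((t - (2*k.toNat+1) : Nat)):Int) from by omega]
        rw [PySem.List.pyGetD_natCast, List.getD_eq_getElem _ _ (by omega)]
        unfold sumT
        rw [pfx_succ nums t h, show t+1-(2*k.toNat+1) = (t-(2*k.toNat+1))+1 from by omega,
            pfx_succ nums _ (by omega)]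
        ring
      · rw [if_neg (by omega)]
        unfold sumT
        rw [pfx_succ nums t h, show t+1-(2*k.toNat+1) = t-(2*k.toNat+1) from by omega]
        ring
    have hres : (if 2*k+1 ≤ (t:Int) + 1 then
          PySem.List.pySetD (resT nums k t) ((t:Int) - k) (PySem.Int.floordiv (sumT nums k (t+1)) (2*k+1))
        else resT nums k t) = resT nums k (t+1) := by
      by_cases h2 : 2*k.toNat ≤ t
      · rw [if_pos (by omega), PySem.List.pySetD_of_nonneg _ _ (by omega)]
        rw [show ((t:Int) - k).toNat = t - k.toNat from by omega]
        apply List.ext_getElem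
        · simp [resT]
        · intro j hj1 hj2
          simp only [resT, List.length_map, List.length_range] at hj1 hj2 ⊢
          rw [List.getElem_set]
          simp only [List.getElem_map, List.getElem_range]
          by_cases hjt : t - k.toNat = j
          · rw [if_pos hjt, if_pos (by omega)]
            unfold sumT
            rw [show j + k.toNat + 1 = t+1 from by omega, show j - k.toNat = t+1-(2*k.toNat+1) from by omega]
          · rw [if_neg hjt]
            by_cases hc : k.toNat ≤ j ∧ j + k.toNat < t
            · rw [if_pos hc, if_pos (by omega)]
            · rw [if_neg hc, if_neg (by omega)]
      · rw [if_neg (by omega)]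
        unfold resT
        refine List.map_congr_left (fun j hj => ?_)
        by_cases hc : k.toNat ≤ j ∧ j + k.toNat < t
        · rw [if_pos hc, if_pos ⟨hc.1, by omega⟩]
        · rw [if_neg hc, if_neg (by omega)]
    simp only []
    rw [hsum, hres]
    rw [show ((t:Int) + 1) = (((t+1 : Nat)):Int) from by push_cast; ring]
    exact ih (t+1) (by omega)

lemma resT_zero (nums : List Int) (k : Int) : resT nums k 0 = List.replicate nums.length (-1) := by
  apply List.ext_getElem
  · simp [resT]
  · intro j h1 h2
    simp only [resT, List.getElem_map, List.getElem_range, List.getElem_replicate]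
    rw [if_neg (by omega)]

lemma sumT_zero (nums : List Int) (k : Int) : sumT nums k 0 = 0 := by
  simp [sumT, pfx]

lemma P_getD (nums : List Int) (i : Nat) (hi : i ≤ nums.length) :
    ([(0:Int)] ++ (List.range nums.length).map (fun j => PySem.List.pyGetD [(0:Int)] (-1) 0 + (nums.take (j+1)).sum)).getD i 0
      = pfx nums i := by
  have hg : PySem.List.pyGetD [(0:Int)] (-1) 0 = 0 := by decide
  cases i with
  | zero => simp [pfx]
  | succ i =>
    rw [List.singleton_append, List.getD_cons_succ, hg,
        PySem.List.getD_map_range _ _ _ _ (by omega)]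
    simp [pfx]

lemma A_eq_resT (nums : List Int) (k : Int) (hk : 0 ≤ k) :
    getAverages1 nums k = resT nums k nums.length := by
  unfold getAverages1
  simp only []
  have e0 : ((List.replicate nums.length (-1 : Int)), (0 : Int)) = (resT nums k 0, sumT nums k 0) := by
    rw [resT_zero, sumT_zero]
  rw [e0]
  have := Aloop nums k hk nums.length 0 (by omega)
  simp only [List.drop_zero, Nat.cast_zero] at this
  rw [this]

lemma B_eq_resT (nums : List Int) (k : Int) (hk : 0 ≤ k) :
    getAverages1_alt nums k = resT nums k nums.length := by
  unfold getAverages1_alt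
  simp only []
  by_cases hw : 2*k+1 ≤ (nums.length : Int)
  · rw [if_pos ⟨hk, hw⟩, buildP]
    rw [setLoop nums.length _ k hk (nums.length - 2*k.toNat) ((nums.length : Int) - k) (by omega) (by omega)]
    apply List.ext_getElem
    · simp [resT]
    · intro j h1 h2
      simp only [resT, List.getElem_map, List.getElem_range,
        List.length_map, List.length_range] at h1 h2 ⊢
      by_cases hc : k.toNat ≤ j ∧ j + k.toNat < nums.length
      · rw [if_pos (by omega), if_pos hc]
        rw [show (j:Int) + k + 1 = (((j + k.toNat + 1 : Nat)):Int) from by omega,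
            show (j:Int) - k = (((j - k.toNat : Nat)):Int) from by omega,
            PySem.List.pyGetD_natCast, PySem.List.pyGetD_natCast,
            P_getD nums _ (by omega), P_getD nums _ (by omega)]
      · rw [if_neg (by omega), if_neg hc]
  · rw [if_neg (by intro hcon; exact hw hcon.2)]
    apply List.ext_getElem
    · simp [resT]
    · intro j h1 h2
      simp only [resT, List.getElem_map, List.getElem_range, List.getElem_replicate] at h1 h2 ⊢
      rw [if_neg (by omega)]


-- ===== VERDICT (by name: the statement is the Claim_ definition above) =====
theorem getAverages1_spec : Claim_equal_getAverages1 := by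
  intro nums k _ hpre
  unfold Spec_getAverages1
  rcases hpre with hk | hnil
  · rw [A_eq_resT nums k hk, B_eq_resT nums k hk]
  · subst hnil
    simp [getAverages1, getAverages1_alt, PySem.List.enumerate_nil]
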